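-- pv_equiv track=rewrite | github.com/Ben-Edwards44/Everybody-Codes | Events/2024-TheKingdomOfAlgorithmia/day1/part3.py | get_potions
-- ===== SOURCE A (Python) =====
-- def get_potions(input):
--     potions = 0
--     for i in range(0, len(input), 3):
--         pair = input[i : i + 3]
--
--         for x in pair:
--             if x == "B":
--                 potions += 1
--             elif x == "C":
--                 potions += 3
--             elif x == "D":
--                 potions += 5
--
--         num_x = pair.count("x")
--
--         if num_x == 0:
--             potions += 6
--         elif num_x == 1:
--             potions += 2
--
--     return potions
-- ===== SOURCE B (Python) =====
-- def get_potions(input):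
--     # closed form: per-letter counts + 6 per group, corrected at each 'x' by
--     # how many 'x's precede it within its own triple
--     total = (input.count("B") + 3 * input.count("C") + 5 * input.count("D")
--              + 6 * ((len(input) + 2) // 3))
--     for i, ch in enumerate(input):
--         if ch == "x":
--             before = input[i - i % 3 : i].count("x")
--             total -= 4 if before == 0 else 2 if before == 1 else 0
--     return total
-- ===== Notes on version B (the rewrite author's own statement) =====
-- stated objective: faster
-- what changed: Replaces A's per-group double loop by a closed form: three whole-string letter counts plus 6 per triple, then a single pass over the marker-character positions subtracting a correction (4, 2 or 0) determined by how many markers precede that position inside its own triple.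
import Mathlib
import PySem

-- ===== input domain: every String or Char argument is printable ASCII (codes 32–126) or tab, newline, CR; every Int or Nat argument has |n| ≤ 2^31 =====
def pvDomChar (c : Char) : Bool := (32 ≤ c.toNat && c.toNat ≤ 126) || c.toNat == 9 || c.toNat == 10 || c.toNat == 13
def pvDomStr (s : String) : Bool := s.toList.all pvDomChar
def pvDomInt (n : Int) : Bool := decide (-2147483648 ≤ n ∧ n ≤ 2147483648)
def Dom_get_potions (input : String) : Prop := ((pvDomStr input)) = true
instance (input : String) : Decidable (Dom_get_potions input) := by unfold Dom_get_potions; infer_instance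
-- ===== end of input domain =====

-- B replaces A's per-group double loop by whole-string letter counts + 6 per triple,
-- corrected at each marker char by the number of preceding markers in its triple (objective: faster in a timing run's measurement; bulk counting replaces per-char Python work).

-- ===== PORT A =====
-- strings are handled through their character lists (PySem.Chars ≡ PySem.List on toList)
def get_potions (input : String) : Int :=
  let cs := input.toList
  (PySem.List.pyRange 0 (cs.length : Int) 3).foldl
    (fun potions i =>
      let pair := PySem.List.slice cs (some i) (some (i + 3))
      let potions := pair.foldl
        (fun p x =>
          if x = 'B' then p + 1
          else if x = 'C' then p + 3
          else if x = 'D' then p + 5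
          else p) potions
      let num_x := PySem.List.count pair 'x'
      if num_x = 0 then potions + 6
      else if num_x = 1 then potions + 2
      else potions) 0

-- ===== PORT B =====
def get_potions_alt (input : String) : Int :=
  let cs := input.toList
  let total := (PySem.List.count cs 'B' : Int) + 3 * (PySem.List.count cs 'C' : Int)
    + 5 * (PySem.List.count cs 'D' : Int)
    + 6 * PySem.Int.floordiv ((cs.length : Int) + 2) 3
  (PySem.List.enumerate cs).foldl
    (fun total p =>
      if p.2 = 'x' then
        let before := PySem.List.count
          (PySem.List.slice cs (some (p.1 - PySem.Int.mod p.1 3)) (some p.1)) 'x'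
        total - (if before = 0 then 4 else if before = 1 then 2 else 0)
      else total) total

-- ===== PRECONDITION & SPEC =====
def Spec_get_potions (input : String) (out : Int) : Prop := out = get_potions_alt input
instance (input : String) (out : Int) : Decidable (Spec_get_potions input out) := by unfold Spec_get_potions; infer_instance

-- ===== CLAIM =====
def Claim_equal_get_potions : Prop := ∀ (input : String), Dom_get_potions input → Spec_get_potions input (get_potions input)

-- ===== LEMMAS AND PROOFS =====

def pvValB (c : Char) : Int :=
  if c = 'B' then 1 else if c = 'C' then 3 else if c = 'D' then 5 else 0

-- value of a chunk of characters
def pvCval (l : List Char) : Int := (l.map pvValB).sum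

def pvBonus (l : List Char) : Int :=
  if PySem.List.count l 'x' = 0 then 6
  else if PySem.List.count l 'x' = 1 then 2 else 0

-- total deduction a group with n 'x's receives in B (6 - bonus)
def pvG (n : Nat) : Int := if n = 0 then 0 else if n = 1 then 4 else 6

-- B's per-'x' deduction as a function of the number of earlier 'x's in the triple
def pvH (n : Nat) : Int := if n = 0 then 4 else if n = 1 then 2 else 0

-- B's per-position deduction term
def pvDedB (cs : List Char) (p : Int × Char) : Int :=
  if p.2 = 'x' then
    pvH (PySem.List.count
      (PySem.List.slice cs (some (p.1 - PySem.Int.mod p.1 3)) (some p.1)) 'x')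
  else 0

lemma pv_foldl_acc_add {α : Type} (c : α → Int) :
    ∀ (L : List α) (p : Int), L.foldl (fun a x => a + c x) p = p + (L.map c).sum := by
  intro L
  induction L with
  | nil => simp
  | cons x xs ih => intro p; simp [List.foldl_cons, ih]; ring

lemma pv_foldl_acc_sub {α : Type} (c : α → Int) :
    ∀ (L : List α) (p : Int), L.foldl (fun a x => a - c x) p = p - (L.map c).sum := by
  intro L
  induction L with
  | nil => simp
  | cons x xs ih => intro p; simp [List.foldl_cons, ih]; ring

lemma pv_cval_append (l₁ l₂ : List Char) : pvCval (l₁ ++ l₂) = pvCval l₁ + pvCval l₂ := by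
  simp [pvCval]

-- A's inner loop is base + chunk value
lemma pv_inner_eq (pair : List Char) (p : Int) :
    pair.foldl
      (fun p x =>
        if x = 'B' then p + 1
        else if x = 'C' then p + 3
        else if x = 'D' then p + 5
        else p) p = p + pvCval pair := by
  have h : (fun (p : Int) (x : Char) =>
        if x = 'B' then p + 1
        else if x = 'C' then p + 3
        else if x = 'D' then p + 5
        else p) = fun a x => a + pvValB x := by
    funext a x; simp [pvValB]; split_ifs <;> ring
  rw [h, pv_foldl_acc_add, pvCval]

-- chunk values summed over groups of three recover the whole string's value
lemma pv_chunk_sum : ∀ (m : Nat) (cs : List Char), cs.length ≤ 3 * m →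
    ((List.range ((cs.length + 2) / 3)).map
        (fun k => pvCval ((cs.drop (3 * k)).take 3))).sum = pvCval cs := by
  intro m
  induction m with
  | zero =>
    intro cs h
    have : cs = [] := List.eq_nil_of_length_eq_zero (by omega)
    subst this; simp [pvCval]
  | succ m ih =>
    intro cs h
    rcases Decidable.em (cs = []) with rfl | hne
    · simp [pvCval]
    · have hn : 0 < cs.length := List.length_pos_iff.mpr hne
      have hg : (cs.length + 2) / 3 = ((cs.drop 3).length + 2) / 3 + 1 := by
        simp only [List.length_drop]; omega
      rw [hg, List.range_succ_eq_map]
      simp only [List.map_cons, List.map_map, List.sum_cons]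
      have hdrop : ∀ k : Nat, cs.drop (3 * (k + 1)) = (cs.drop 3).drop (3 * k) := by
        intro k; rw [List.drop_drop]; ring_nf
      have hmap : ((List.range (((cs.drop 3).length + 2) / 3)).map
            ((fun k => pvCval ((cs.drop (3 * k)).take 3)) ∘ Nat.succ)).sum
          = ((List.range (((cs.drop 3).length + 2) / 3)).map
            (fun k => pvCval (((cs.drop 3).drop (3 * k)).take 3))).sum := by
        congr 1
        apply List.map_congr_left
        intro k _
        simp only [Function.comp, Nat.succ_eq_add_one]
        rw [hdrop k]
      rw [hmap, ih (cs.drop 3) (by simp only [List.length_drop]; omega)]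
      have : cs = cs.take 3 ++ cs.drop 3 := (List.take_append_drop 3 cs).symm
      conv_rhs => rw [this]
      rw [pv_cval_append]
      simp [List.drop_zero]

-- the A-side fold over groups, in closed form
lemma pv_foldA (cs : List Char) (p : Int) :
    (PySem.List.pyRange 0 (cs.length : Int) 3).foldl
      (fun potions i =>
        let pair := PySem.List.slice cs (some i) (some (i + 3))
        let potions := pair.foldl
          (fun p x =>
            if x = 'B' then p + 1
            else if x = 'C' then p + 3
            else if x = 'D' then p + 5
            else p) potions
        let num_x := PySem.List.count pair 'x'
        if num_x = 0 then potions + 6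
        else if num_x = 1 then potions + 2
        else potions) p
    = p + ((PySem.List.pyRange 0 (cs.length : Int) 3).map
        (fun i => pvCval (PySem.List.slice cs (some i) (some (i + 3)))
          + pvBonus (PySem.List.slice cs (some i) (some (i + 3))))).sum := by
  have h : (fun (potions : Int) (i : Int) =>
      let pair := PySem.List.slice cs (some i) (some (i + 3))
      let potions := pair.foldl
        (fun p x =>
          if x = 'B' then p + 1
          else if x = 'C' then p + 3
          else if x = 'D' then p + 5
          else p) potions
      let num_x := PySem.List.count pair 'x'
      if num_x = 0 then potions + 6
      else if num_x = 1 then potions + 2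
      else potions)
      = fun a i => a + (pvCval (PySem.List.slice cs (some i) (some (i + 3)))
          + pvBonus (PySem.List.slice cs (some i) (some (i + 3)))) := by
    funext a i
    simp only [pv_inner_eq, pvBonus]
    split_ifs <;> ring
  rw [h, pv_foldl_acc_add]

-- group count as a Nat
lemma pv_range_eq (cs : List Char) :
    PySem.List.pyRange 0 (cs.length : Int) 3
      = (List.range ((cs.length + 2) / 3)).map (fun k => ((3 * k : Nat) : Int)) := by
  rw [PySem.List.pyRange_of_pos 0 (cs.length : Int) (by norm_num)]
  have hM : (if (0 : Int) < (cs.length : Int)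
      then (((cs.length : Int) - 0 + 3 - 1) / 3).toNat else 0) = (cs.length + 2) / 3 := by
    split_ifs with h
    · omega
    · omega
  rw [hM]
  apply List.map_congr_left
  intro k _
  push_cast
  ring

-- slices at 3k..3k+3 are take-3 chunks
lemma pv_slice_eq (cs : List Char) (k : Nat) :
    PySem.List.slice cs (some ((3 * k : Nat) : Int)) (some (((3 * k : Nat) : Int) + 3))
      = (cs.drop (3 * k)).take 3 := by
  have : (((3 * k : Nat) : Int) + 3) = (((3 * k + 3 : Nat)) : Int) := by push_cast; ring
  rw [this, PySem.List.slice_natCast]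
  congr 1
  omega

-- Σ chunk values over the range equals the flat value of the string
lemma pv_sum_cval (cs : List Char) :
    ((PySem.List.pyRange 0 (cs.length : Int) 3).map
        (fun i => pvCval (PySem.List.slice cs (some i) (some (i + 3))))).sum = pvCval cs := by
  rw [pv_range_eq, List.map_map]
  have h : ((fun i => pvCval (PySem.List.slice cs (some i) (some (i + 3))))
        ∘ (fun k : Nat => ((3 * k : Nat) : Int)))
      = fun k => pvCval ((cs.drop (3 * k)).take 3) := by
    funext k
    simp only [Function.comp]
    rw [pv_slice_eq]
  rw [h]
  exact pv_chunk_sum cs.length cs (by omega)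

-- the letter counts compute the flat value of the string
lemma pv_cval_counts : ∀ (cs : List Char),
    (List.count 'B' cs : Int) + 3 * (List.count 'C' cs : Int) + 5 * (List.count 'D' cs : Int)
      = pvCval cs := by
  intro cs
  induction cs with
  | nil => simp [pvCval]
  | cons c cs ih =>
    simp only [List.count_cons, pvCval, List.map_cons, List.sum_cons]
    by_cases h1 : c = 'B' <;> by_cases h2 : c = 'C' <;> by_cases h3 : c = 'D' <;>
      simp_all [pvValB, pvCval] <;> push_cast <;> linarith [ih]

-- the group bonus is 6 minus the deduction pvG
lemma pv_bonus_eq (l : List Char) : pvBonus l = 6 - pvG (List.count 'x' l) := by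
  simp only [pvBonus, pvG, PySem.List.count_eq]
  split_ifs <;> omega

-- B's loop body subtracts pvDedB
lemma pv_stepB (cs : List Char) :
    (fun (total : Int) (p : Int × Char) =>
      if p.2 = 'x' then
        let before := PySem.List.count
          (PySem.List.slice cs (some (p.1 - PySem.Int.mod p.1 3)) (some p.1)) 'x'
        total - (if before = 0 then 4 else if before = 1 then 2 else 0)
      else total)
    = fun a p => a - pvDedB cs p := by
  funext a p
  simp only [pvDedB, pvH]
  split_ifs <;> ring

-- evaluating pvDedB at position off + j, j < 3, off a multiple of 3
lemma pv_dedB_eval (full l : List Char) (off j : Nat) (x : Char)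
    (hoff : off % 3 = 0) (hj : j < 3) (hjl : j ≤ l.length) (hpre : l <+: full.drop off) :
    pvDedB full ((off : Int) + (j : Int), x)
      = if x = 'x' then pvH (List.count 'x' (l.take j)) else 0 := by
  obtain ⟨t, ht⟩ := hpre
  have hcast : ((off : Int) + (j : Int)) = ((off + j : Nat) : Int) := by push_cast; ring
  have hmod : (off + j) % 3 = j := by omega
  have hsub : ((off + j : Nat) : Int) - ((j : Nat) : Int) = ((off : Nat) : Int) := by
    push_cast; ring
  have hm : PySem.Int.mod ((off + j : Nat) : Int) 3 = ((j : Nat) : Int) := by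
    have h3 : ((3 : Nat) : Int) = 3 := by norm_num
    rw [← h3, PySem.Int.mod_natCast, hmod]
  simp only [pvDedB, hcast, hm, hsub, PySem.List.slice_natCast]
  have htake : (full.drop off).take (off + j - off) = l.take j := by
    rw [← ht]
    have : off + j - off = j := by omega
    rw [this, List.take_append_of_le_length hjl]
  rw [htake, PySem.List.count_eq]

-- the deduction sum over one chunk (≤ 3 chars) is pvG of its 'x'-count
lemma pv_chunkDed (full l : List Char) (off : Nat)
    (hoff : off % 3 = 0) (hl : l.length ≤ 3) (hpre : l <+: full.drop off) :
    ((PySem.List.enumerate l (off : Int)).map (pvDedB full)).sum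
      = pvG (List.count 'x' l) := by
  match l, hl with
  | [], _ => simp [pvG, PySem.List.enumerate]
  | [a], _ =>
    have e0 := pv_dedB_eval full [a] off 0 a hoff (by omega) (by simp) hpre
    simp only [PySem.List.enumerate, List.map_cons, List.map_nil, List.sum_cons, List.sum_nil]
    simp only [Nat.cast_zero, add_zero] at e0
    rw [e0]
    by_cases ha : a = 'x' <;> simp [ha, pvG, pvH, List.count_cons]
  | [a, b], _ =>
    have e0 := pv_dedB_eval full [a, b] off 0 a hoff (by omega) (by simp) hpre
    have e1 := pv_dedB_eval full [a, b] off 1 b hoff (by omega) (by simp) hpre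
    simp only [Nat.cast_zero, Nat.cast_one, add_zero] at e0 e1
    simp only [PySem.List.enumerate, List.map_cons, List.map_nil,
      List.sum_cons, List.sum_nil]
    rw [e0, e1]
    by_cases ha : a = 'x' <;> by_cases hb : b = 'x' <;>
      simp [ha, hb, pvG, pvH, List.count_cons]
  | [a, b, c], _ =>
    have e0 := pv_dedB_eval full [a, b, c] off 0 a hoff (by omega) (by simp) hpre
    have e1 := pv_dedB_eval full [a, b, c] off 1 b hoff (by omega) (by simp) hpre
    have e2 := pv_dedB_eval full [a, b, c] off 2 c hoff (by omega) (by simp) hpre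
    simp only [Nat.cast_zero, Nat.cast_one, Nat.cast_ofNat, add_zero] at e0 e1 e2
    simp only [PySem.List.enumerate, List.map_cons, List.map_nil,
      List.sum_cons, List.sum_nil]
    rw [show ((off : Int) + 1 + 1) = ((off : Int) + 2) from by ring, e0, e1, e2]
    by_cases ha : a = 'x' <;> by_cases hb : b = 'x' <;> by_cases hc : c = 'x' <;>
      simp [ha, hb, hc, pvG, pvH, List.count_cons] <;> ring

-- the total deduction sum equals the sum of per-chunk deductions
lemma pv_dsum : ∀ (m : Nat) (full cs : List Char) (off : Nat), off % 3 = 0 →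
    full.drop off = cs → cs.length ≤ 3 * m →
    ((PySem.List.enumerate cs (off : Int)).map (pvDedB full)).sum
      = ((List.range ((cs.length + 2) / 3)).map
          (fun k => pvG (List.count 'x' ((cs.drop (3 * k)).take 3)))).sum := by
  intro m
  induction m with
  | zero =>
    intro full cs off _ _ h
    have : cs = [] := List.eq_nil_of_length_eq_zero (by omega)
    subst this; simp [PySem.List.enumerate]
  | succ m ih =>
    intro full cs off hoff hdrop h
    by_cases hle : cs.length ≤ 3
    · rcases Decidable.em (cs = []) with rfl | hne
      · simp [PySem.List.enumerate]
      · have hn : 0 < cs.length := List.length_pos_iff.mpr hne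
        have hg : (cs.length + 2) / 3 = 1 := by omega
        rw [hg]
        have hpre : cs <+: full.drop off := by rw [hdrop]
        rw [pv_chunkDed full cs off hoff hle hpre]
        simp [List.take_of_length_le hle]
    · have hsplit : cs = cs.take 3 ++ cs.drop 3 := (List.take_append_drop 3 cs).symm
      have hlen3 : (cs.take 3).length = 3 := by
        simp [List.length_take]; omega
      conv_lhs => rw [hsplit]
      rw [PySem.List.enumerate_append]
      rw [List.map_append, List.sum_append]
      have hpre3 : cs.take 3 <+: full.drop off := by rw [hdrop]; exact List.take_prefix 3 cs
      rw [pv_chunkDed full (cs.take 3) off hoff (by omega) hpre3]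
      have hshift : (off : Int) + ((cs.take 3).length : Int) = ((off + 3 : Nat) : Int) := by
        rw [hlen3]; push_cast; ring
      rw [hshift]
      have hdrop' : full.drop (off + 3) = cs.drop 3 := by
        subst hdrop; rw [List.drop_drop]
      rw [ih full (cs.drop 3) (off + 3) (by omega) hdrop'
        (by simp only [List.length_drop]; omega)]
      -- recombine the range sum
      have hg : (cs.length + 2) / 3 = ((cs.drop 3).length + 2) / 3 + 1 := by
        simp only [List.length_drop]; omega
      rw [hg, List.range_succ_eq_map]
      simp only [List.map_cons, List.map_map, List.sum_cons]
      have hdropk : ∀ k : Nat, cs.drop (3 * (k + 1)) = (cs.drop 3).drop (3 * k) := by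
        intro k; rw [List.drop_drop]; ring_nf
      have hmap : ((List.range (((cs.drop 3).length + 2) / 3)).map
            ((fun k => pvG (List.count 'x' ((cs.drop (3 * k)).take 3))) ∘ Nat.succ)).sum
          = ((List.range (((cs.drop 3).length + 2) / 3)).map
            (fun k => pvG (List.count 'x' (((cs.drop 3).drop (3 * k)).take 3)))).sum := by
        congr 1
        apply List.map_congr_left
        intro k _
        simp only [Function.comp, Nat.succ_eq_add_one]
        rw [hdropk k]
      rw [hmap]
      simp [List.drop_zero]

-- ===== VERDICT (by name: the statement is the Claim_ definition above) =====
theorem get_potions_spec : Claim_equal_get_potions := by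
  intro input _
  unfold Spec_get_potions get_potions get_potions_alt
  simp only []
  set cs := input.toList with hcs
  -- A side
  rw [pv_foldA]
  have hsplitA : ((PySem.List.pyRange 0 ((cs.length : Int)) 3).map
      (fun i => pvCval (PySem.List.slice cs (some i) (some (i + 3)))
        + pvBonus (PySem.List.slice cs (some i) (some (i + 3))))).sum
    = ((PySem.List.pyRange 0 ((cs.length : Int)) 3).map
        (fun i => pvCval (PySem.List.slice cs (some i) (some (i + 3))))).sum
      + ((PySem.List.pyRange 0 ((cs.length : Int)) 3).map
        (fun i => pvBonus (PySem.List.slice cs (some i) (some (i + 3))))).sum :=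
    PySem.List.sum_map_add_int _ _ _
  rw [hsplitA, pv_sum_cval]
  -- A-side bonus sum in range form
  have hbonus : ((PySem.List.pyRange 0 ((cs.length : Int)) 3).map
      (fun i => pvBonus (PySem.List.slice cs (some i) (some (i + 3))))).sum
    = ((List.range ((cs.length + 2) / 3)).map
        (fun k => 6 - pvG (List.count 'x' ((cs.drop (3 * k)).take 3)))).sum := by
    rw [pv_range_eq, List.map_map]
    congr 1
    apply List.map_congr_left
    intro k _
    simp only [Function.comp]
    rw [pv_slice_eq, pv_bonus_eq]
  rw [hbonus]
  have hsub : ((List.range ((cs.length + 2) / 3)).map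
      (fun k => 6 - pvG (List.count 'x' ((cs.drop (3 * k)).take 3)))).sum
    = 6 * ((cs.length + 2) / 3 : Nat)
      - ((List.range ((cs.length + 2) / 3)).map
          (fun k => pvG (List.count 'x' ((cs.drop (3 * k)).take 3)))).sum := by
    have h : (fun k => (6 : Int) - pvG (List.count 'x' ((cs.drop (3 * k)).take 3)))
        = fun k => (6 : Int) + (- pvG (List.count 'x' ((cs.drop (3 * k)).take 3))) := by
      funext k; ring
    rw [h, PySem.List.sum_map_add_int, PySem.List.sum_map_const_int]
    have hneg : ∀ (L : List Nat) (f : Nat → Int),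
        (L.map (fun k => - f k)).sum = - (L.map f).sum := by
      intro L f
      induction L with
      | nil => simp
      | cons a l ih => simp [ih]; ring
    have : ((List.range ((cs.length + 2) / 3)).map
        (fun k => - pvG (List.count 'x' ((cs.drop (3 * k)).take 3)))).sum
      = - ((List.range ((cs.length + 2) / 3)).map
          (fun k => pvG (List.count 'x' ((cs.drop (3 * k)).take 3)))).sum :=
      hneg _ _
    rw [this, List.length_range]
    ring
  rw [hsub]
  -- B side
  rw [pv_stepB, pv_foldl_acc_sub]
  have henum : PySem.List.enumerate cs = PySem.List.enumerate cs ((0 : Nat) : Int) := by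
    norm_num [PySem.List.enumerate]
  rw [henum, pv_dsum cs.length cs cs 0 (by omega) (by simp) (by omega)]
  have hcnt : ∀ v : Char, (PySem.List.count cs v : Int) = (List.count v cs : Int) := by
    intro v; rw [PySem.List.count_eq]
  rw [hcnt, hcnt, hcnt, pv_cval_counts]
  have hfd : PySem.Int.floordiv ((cs.length : Int) + 2) 3 = (((cs.length + 2) / 3 : Nat) : Int) := by
    have h := PySem.Int.floordiv_natCast (cs.length + 2) 3
    have h3 : ((3 : Nat) : Int) = 3 := by norm_num
    rw [h3] at h
    have h2 : ((cs.length : Int) + 2) = ((cs.length + 2 : Nat) : Int) := by push_cast; ring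
    rw [h2, h]
  rw [hfd]
  ring
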